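-- pv_equiv track=rewrite | github.com/Kranthi98/NBA-Lineup-Optimizer-using-PuLP | Pulp NBA Optimzer2.py | sort_players
-- ===== SOURCE A (Python) =====
-- def sort_players(x):
--     ordered_players = []
--     ordered_players = ordered_players+[y for y in x if "PG)" in y]
--     ordered_players = ordered_players+[y for y in x if "SG)" in y]
--     ordered_players = ordered_players+[y for y in x if "SF)" in y]
--     ordered_players = ordered_players+[y for y in x if "PF)" in y]
--     ordered_players = ordered_players+[y for y in x if "C)" in y]
--
--     return ordered_players
-- ===== SOURCE B (Python) =====
-- def sort_players(x):
--     pg, sg, sf, pf, c = [], [], [], [], []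
--     for y in x:
--         if "PG)" in y:
--             pg.append(y)
--         if "SG)" in y:
--             sg.append(y)
--         if "SF)" in y:
--             sf.append(y)
--         if "PF)" in y:
--             pf.append(y)
--         if "C)" in y:
--             c.append(y)
--     return pg + sg + sf + pf + c
-- ===== Notes on version B (the rewrite author's own statement) =====
-- stated objective: alternative
-- what changed: One pass over x maintaining five position buckets (independent ifs so multi-position strings are duplicated) instead of five separate list-comprehension scans.
import Mathlib
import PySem

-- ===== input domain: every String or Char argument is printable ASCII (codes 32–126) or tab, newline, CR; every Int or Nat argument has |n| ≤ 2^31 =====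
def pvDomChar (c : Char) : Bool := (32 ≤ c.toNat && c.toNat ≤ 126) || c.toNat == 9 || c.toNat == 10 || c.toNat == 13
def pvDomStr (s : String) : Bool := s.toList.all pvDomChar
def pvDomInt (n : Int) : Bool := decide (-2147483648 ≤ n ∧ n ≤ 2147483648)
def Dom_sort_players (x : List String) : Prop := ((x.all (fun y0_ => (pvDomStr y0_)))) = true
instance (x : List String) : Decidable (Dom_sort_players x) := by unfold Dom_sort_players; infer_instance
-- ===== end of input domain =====

-- B replaces A's five separate scans of x by a single pass maintaining five position buckets (objective: alternative decomposition).


-- ===== PORT A =====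
def sort_players (x : List String) : List String :=
  let ordered_players : List String := []
  let ordered_players := ordered_players ++ x.filter (fun y => PySem.Str.isIn "PG)" y)
  let ordered_players := ordered_players ++ x.filter (fun y => PySem.Str.isIn "SG)" y)
  let ordered_players := ordered_players ++ x.filter (fun y => PySem.Str.isIn "SF)" y)
  let ordered_players := ordered_players ++ x.filter (fun y => PySem.Str.isIn "PF)" y)
  let ordered_players := ordered_players ++ x.filter (fun y => PySem.Str.isIn "C)" y)
  ordered_players

-- ===== PORT B =====
-- single pass: one fold over x updating five buckets; independent ifs, so a string may enter several buckets
def pvStep (b : List String × List String × List String × List String × List String)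
    (y : String) : List String × List String × List String × List String × List String :=
  match b with
  | (pg, sg, sf, pf, c) =>
    ((if PySem.Str.isIn "PG)" y then pg ++ [y] else pg),
     (if PySem.Str.isIn "SG)" y then sg ++ [y] else sg),
     (if PySem.Str.isIn "SF)" y then sf ++ [y] else sf),
     (if PySem.Str.isIn "PF)" y then pf ++ [y] else pf),
     (if PySem.Str.isIn "C)" y then c ++ [y] else c))

def sort_players_alt (x : List String) : List String :=
  match x.foldl pvStep ([], [], [], [], []) with
  | (pg, sg, sf, pf, c) => pg ++ sg ++ sf ++ pf ++ c

-- ===== PRECONDITION & SPEC =====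
def Spec_sort_players (x : List String) (out : List String) : Prop := out = sort_players_alt x
instance (x : List String) (out : List String) : Decidable (Spec_sort_players x out) := by unfold Spec_sort_players; infer_instance

-- ===== CLAIM =====
def Claim_equal_sort_players : Prop := ∀ (x : List String), Dom_sort_players x → Spec_sort_players x (sort_players x)

-- ===== LEMMAS AND PROOFS =====
theorem sort_players_alt_fold (x : List String) (pg sg sf pf c : List String) :
    x.foldl pvStep (pg, sg, sf, pf, c)
    = (pg ++ x.filter (fun y => PySem.Str.isIn "PG)" y),
       sg ++ x.filter (fun y => PySem.Str.isIn "SG)" y),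
       sf ++ x.filter (fun y => PySem.Str.isIn "SF)" y),
       pf ++ x.filter (fun y => PySem.Str.isIn "PF)" y),
       c ++ x.filter (fun y => PySem.Str.isIn "C)" y)) := by
  induction x generalizing pg sg sf pf c with
  | nil => simp
  | cons y t ih =>
    simp only [List.foldl_cons, List.filter_cons, pvStep]
    rw [ih]
    split_ifs <;> simp

-- ===== VERDICT =====
theorem sort_players_spec : Claim_equal_sort_players := by
  intro x _
  unfold Spec_sort_players sort_players sort_players_alt
  rw [sort_players_alt_fold]
  simp
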